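-- pv_equiv track=rewrite | github.com/nailen1/qiskit_qcsg_extensions | qcrg_qiskit_problem_solver/general_utils.py | extend_counts
-- ===== SOURCE A (Python) =====
-- def extend_counts(counts):
--     output_format = list(counts.keys())[0]
--     n = len(output_format)
--     possible_results = [format(i, f'0{n}b') for i in range(2**n)]
--     extended_counts = {result: counts.get(result, 0) for result in possible_results}
--     for key, value in counts.items():
--         extended_counts[key] = value
--     return extended_counts
-- ===== SOURCE B (Python) =====
-- def extend_counts(counts):
--     n = len(next(iter(counts)))
--     def bits(k):
--         if k == 0:
--             return ['']
--         rest = bits(k - 1)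
--         return ['0' + r for r in rest] + ['1' + r for r in rest]
--     pairs = [(b, counts.get(b, 0)) for b in bits(n)]
--     pairs += [(k, v) for k, v in counts.items()
--               if len(k) != n or any(c != '0' and c != '1' for c in k)]
--     return dict(pairs)
-- ===== Notes on version B (the rewrite author's own statement) =====
-- stated objective: alternative
-- what changed: B generates the 2^n bitstrings by recursive string-doubling (prepending '0'/'1' to the (n-1)-bit strings) instead of formatting every integer in range(2**n), and appends the leftover non-bitstring keys with a single property-based filter (length/charset test) instead of A's overwrite-every-item second pass over the dict.
-- intended difference: When the first key is the empty string (n = 0) and '0' is not already a key, A returns the dict with a spurious extra key '0' mapped to 0 (format(0,'00b') is '0', not ''), while B adds nothing since '' is the unique 0-bit string, which is the intended expansion. — e.g. on extend_counts([("", 3)]): A returns [("0", 0), ("", 3)], B returns [("", 3)]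
-- outside the precondition, e.g. on extend_counts({'': 4, '0': -1}): A returns {'0': -1, '': 4}, B returns {'': 4, '0': -1}
import Mathlib
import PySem

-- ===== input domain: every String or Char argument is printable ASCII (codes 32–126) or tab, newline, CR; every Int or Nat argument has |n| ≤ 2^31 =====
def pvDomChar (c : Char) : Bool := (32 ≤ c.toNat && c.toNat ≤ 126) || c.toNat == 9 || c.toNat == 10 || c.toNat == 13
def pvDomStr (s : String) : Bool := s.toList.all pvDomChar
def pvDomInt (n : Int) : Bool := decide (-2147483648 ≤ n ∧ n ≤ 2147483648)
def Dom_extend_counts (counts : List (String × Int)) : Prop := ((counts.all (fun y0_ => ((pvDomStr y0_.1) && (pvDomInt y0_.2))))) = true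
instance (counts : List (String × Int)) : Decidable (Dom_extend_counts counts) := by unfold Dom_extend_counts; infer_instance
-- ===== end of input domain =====

-- B replaces A's integer loop (format(i, '0{n}b') over range(2**n)) by a recursive
-- string-doubling generation of the bitstrings and a single filtered append of the
-- leftover keys, instead of A's overwrite-every-item pass (objective: alternative).

-- ===== PORT A =====
-- format(i, f'0{n}b'): zero-pad the binary digits to width n; exact for 0 ≤ i (all uses here)
def fmt0nb (n : Nat) (i : Int) : List Char :=
  let s := PySem.Int.toBinChars i
  List.replicate (n - s.length) '0' ++ s

def extend_counts (counts : List (String × Int)) : List (String × Int) :=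
  let d : PySem.Dict String Int := PySem.Dict.mk counts
  match PySem.List.pyGet? (PySem.Dict.keys d) 0 with
  | none => []   -- list(counts.keys())[0] raises IndexError: excluded by Pre_
  | some output_format =>
    let n : Nat := output_format.toList.length
    let possible_results : List String :=
      (PySem.List.pyRange 0 ((2:Int)^n)).map (fun i => String.ofList (fmt0nb n i))
    let extended := possible_results.foldl
      (fun e r => e.insert r (PySem.Dict.getD d r 0)) PySem.Dict.empty
    let extended := (PySem.Dict.items d).foldl (fun e kv => e.insert kv.1 kv.2) extended
    PySem.Dict.items extended

-- ===== PORT B =====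
-- bits(k): all k-bit strings, '0'-branch first (strings as char lists; exact)
def bitsB : Nat → List (List Char)
  | 0 => [[]]
  | k+1 => (bitsB k).map (fun r => '0' :: r) ++ (bitsB k).map (fun r => '1' :: r)

def extend_counts_alt (counts : List (String × Int)) : List (String × Int) :=
  let d : PySem.Dict String Int := PySem.Dict.mk counts
  match counts.head? with
  | none => []   -- next(iter(counts)) raises StopIteration: excluded by Pre_
  | some kv0 =>
    let n : Nat := kv0.1.toList.length
    let pairs1 := (bitsB n).map (fun b => (String.ofList b, PySem.Dict.getD d (String.ofList b) 0))
    let pairs2 := (PySem.Dict.items d).filter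
      (fun kv => decide (kv.1.toList.length ≠ n)
                 || kv.1.toList.any (fun c => !(c == '0') && !(c == '1')))
    PySem.Dict.items (PySem.Dict.ofList (pairs1 ++ pairs2))

-- ===== PRECONDITION & SPEC =====
-- Pre_ excludes the empty dict (A raises IndexError), association lists with duplicate
-- keys (impossible for a Python dict argument), and dicts whose first key is "" while "0"
-- is already a key: there A and B return EQUAL dicts whose insertion orders differ, an
-- accidental-order corner the list-valued ports cannot both realise.
def Pre_extend_counts (counts : List (String × Int)) : Prop :=
  counts ≠ [] ∧ (counts.map Prod.fst).Nodup ∧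
    ¬ (counts.head?.map Prod.fst = some "" ∧ "0" ∈ counts.map Prod.fst)
instance (counts : List (String × Int)) : Decidable (Pre_extend_counts counts) := by
  unfold Pre_extend_counts; infer_instance

def pvWitness_extend_counts : (List (String × Int)) := [("0", 1)]

-- When the FIRST key is the empty string (n = 0) and '0' is not a key, A returns the
-- dict with a spurious extra key '0' mapped to 0 (format(0,'00b') is '0', not ''), while
-- B adds nothing — '' itself is the unique 0-bit string — which is the intended expansion.
def D_extend_counts (counts : List (String × Int)) : Prop :=
  counts.head?.map Prod.fst = some "" ∧ "0" ∉ counts.map Prod.fst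
instance (counts : List (String × Int)) : Decidable (D_extend_counts counts) := by
  unfold D_extend_counts; infer_instance

def Spec_extend_counts (counts : List (String × Int)) (out : List (String × Int)) : Prop :=
  ¬ D_extend_counts counts → out = extend_counts_alt counts
instance (counts : List (String × Int)) (out : List (String × Int)) : Decidable (Spec_extend_counts counts out) := by
  unfold Spec_extend_counts; infer_instance

def pvDiffWitness_extend_counts : (List (String × Int)) := [("", 3)]
def pvDiffWitnessOut_extend_counts : (List (String × Int)) × (List (String × Int)) :=
  ([("0", 0), ("", 3)], [("", 3)])

-- ===== CLAIM (what is proved, stated in full; the proofs are below) =====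
def Claim_unchanged_extend_counts : Prop := ∀ (counts : List (String × Int)), Dom_extend_counts counts → Pre_extend_counts counts → Spec_extend_counts counts (extend_counts counts)
def Claim_changed_extend_counts : Prop := Dom_extend_counts (pvDiffWitness_extend_counts) ∧ Pre_extend_counts (pvDiffWitness_extend_counts) ∧ D_extend_counts (pvDiffWitness_extend_counts) ∧ extend_counts (pvDiffWitness_extend_counts) = pvDiffWitnessOut_extend_counts.1 ∧ extend_counts_alt (pvDiffWitness_extend_counts) = pvDiffWitnessOut_extend_counts.2 ∧ pvDiffWitnessOut_extend_counts.1 ≠ pvDiffWitnessOut_extend_counts.2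
def Claim_exact_extend_counts : Prop := ∀ (counts : List (String × Int)), Dom_extend_counts counts → Pre_extend_counts counts → D_extend_counts counts → extend_counts counts ≠ extend_counts_alt counts

-- ===== LEMMAS AND PROOFS =====

theorem toDigitsCore_succ (b f n : Nat) (acc : List Char) :
    Nat.toDigitsCore b (f+1) n acc
      = if n / b = 0 then (n % b).digitChar :: acc
        else Nat.toDigitsCore b f (n / b) ((n % b).digitChar :: acc) := rfl

theorem toDigitsCore_acc (b : Nat) (_hb : 2 ≤ b) :
    ∀ (f n : Nat) (acc : List Char), n < b ^ f →
      Nat.toDigitsCore b f n acc = Nat.toDigitsCore b f n [] ++ acc := by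
  intro f
  induction f with
  | zero => intro n acc h; simp [Nat.toDigitsCore]
  | succ f ih =>
    intro n acc h
    simp only [Nat.toDigitsCore]
    by_cases h0 : n / b = 0
    · simp [h0]
    · simp only [h0, if_false]
      have hlt : n / b < b ^ f := Nat.div_lt_of_lt_mul (by rwa [← pow_succ'])
      rw [ih (n / b) _ hlt]
      conv_rhs => rw [ih (n / b) _ hlt]
      simp

theorem toDigits_of_lt (b m : Nat) (_hb : 2 ≤ b) (hm : m < b) :
    Nat.toDigits b m = [Nat.digitChar m] := by
  simp [Nat.toDigits, Nat.toDigitsCore, Nat.div_eq_of_lt hm, Nat.mod_eq_of_lt hm]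

theorem toDigitsCore_eq_toDigits (b : Nat) (hb : 2 ≤ b) :
    ∀ (m f : Nat), 0 < f → m < b ^ f → Nat.toDigitsCore b f m [] = Nat.toDigits b m := by
  intro m
  induction m using Nat.strong_induction_on with
  | _ m IH =>
    intro f hf hmf
    obtain ⟨f, rfl⟩ := Nat.exists_eq_succ_of_ne_zero (Nat.pos_iff_ne_zero.mp hf)
    by_cases h0 : m / b = 0
    · have hm : m < b := (Nat.div_eq_zero_iff_lt (by omega)).mp h0
      simp [Nat.toDigitsCore, h0, toDigits_of_lt b m (by omega) hm, Nat.mod_eq_of_lt hm]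
    · have hbm : b ≤ m := by
        by_contra hlt
        exact h0 (Nat.div_eq_of_lt (by omega))
      have hfpos : 0 < f := by
        rcases Nat.eq_zero_or_pos f with rfl | h
        · simp at hmf; omega
        · exact h
      have hdivf : m / b < b ^ f := Nat.div_lt_of_lt_mul (by rwa [← pow_succ'])
      have hdivm : m / b < b ^ m := lt_of_lt_of_le (Nat.div_lt_self (by omega) (by omega))
        (le_of_lt (Nat.lt_pow_self (by omega)))
      have hmm : m < m + 1 := Nat.lt_succ_self m
      calc Nat.toDigitsCore b (f+1) m []
          = Nat.toDigitsCore b f (m / b) [(m % b).digitChar] := by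
            simp [Nat.toDigitsCore, h0]
        _ = Nat.toDigitsCore b f (m / b) [] ++ [(m % b).digitChar] :=
            toDigitsCore_acc b hb f (m / b) _ hdivf
        _ = Nat.toDigits b (m / b) ++ [(m % b).digitChar] := by
            rw [IH (m / b) (Nat.div_lt_self (by omega) (by omega)) f hfpos hdivf]
        _ = Nat.toDigitsCore b m (m / b) [] ++ [(m % b).digitChar] := by
            rw [IH (m / b) (Nat.div_lt_self (by omega) (by omega)) m (by omega) hdivm]
        _ = Nat.toDigitsCore b m (m / b) [(m % b).digitChar] :=
            (toDigitsCore_acc b hb m (m / b) _ hdivm).symm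
        _ = Nat.toDigits b m := by
            conv_rhs => rw [Nat.toDigits, toDigitsCore_succ]
            simp only [h0, if_false]

theorem toDigits_step (b m : Nat) (hb : 2 ≤ b) (hm : b ≤ m) :
    Nat.toDigits b m = Nat.toDigits b (m / b) ++ [Nat.digitChar (m % b)] := by
  have h0 : ¬ m / b = 0 := by
    intro h; have := (Nat.div_eq_zero_iff_lt (by omega)).mp h; omega
  have hdivm : m / b < b ^ m := lt_of_lt_of_le (Nat.div_lt_self (by omega) (by omega))
    (le_of_lt (Nat.lt_pow_self (by omega)))
  conv_lhs => rw [Nat.toDigits, toDigitsCore_succ]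
  simp only [h0, if_false]
  rw [toDigitsCore_acc b hb m (m / b) _ hdivm,
    toDigitsCore_eq_toDigits b hb (m / b) m (by omega) hdivm]

def padC (n j : Nat) : List Char :=
  List.replicate (n - (Nat.toDigits 2 j).length) '0' ++ Nat.toDigits 2 j

theorem padC_succ_low (n j : Nat) (hn : 0 < n) (hj : j < 2 ^ n) :
    padC (n + 1) j = '0' :: padC n j := by
  have hL : (Nat.toDigits 2 j).length ≤ n := Nat.toDigits_length 2 j n hn hj
  unfold padC
  rw [show n + 1 - (Nat.toDigits 2 j).length = (n - (Nat.toDigits 2 j).length) + 1 by omega,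
    List.replicate_succ]
  simp

theorem padC_div (n j : Nat) (hn : 1 ≤ n) (hj : j < 2 ^ (n + 1)) :
    padC (n + 1) j = padC n (j / 2) ++ [Nat.digitChar (j % 2)] := by
  by_cases h2 : j < 2
  · have hdiv : j / 2 = 0 := Nat.div_eq_of_lt h2
    have hmod : j % 2 = j := Nat.mod_eq_of_lt h2
    unfold padC
    rw [hdiv, hmod, toDigits_of_lt 2 j (by omega) h2, toDigits_of_lt 2 0 (by omega) (by omega)]
    simp only [List.length_singleton]
    rw [show Nat.digitChar 0 = '0' from rfl,
      show List.replicate (n - 1) '0' ++ ['0'] = List.replicate n '0' by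
        rw [show n = (n - 1) + 1 by omega, List.replicate_succ']
        simp [show n - 1 + 1 - 1 = n - 1 by omega]]
    simp [show n + 1 - 1 = n by omega]
  · have hstep := toDigits_step 2 j (by omega) (by omega)
    unfold padC
    rw [hstep]
    simp only [List.length_append, List.length_singleton]
    rw [show n + 1 - ((Nat.toDigits 2 (j / 2)).length + 1) = n - (Nat.toDigits 2 (j / 2)).length by omega]
    simp [List.append_assoc]

theorem toDigits_two_pow_add (n : Nat) (hn : 1 ≤ n) :
    ∀ j < 2 ^ n, Nat.toDigits 2 (2 ^ n + j) = '1' :: padC n j := by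
  induction n, hn using Nat.le_induction with
  | base =>
    intro j hj
    interval_cases j <;> decide
  | succ n hn ih =>
    intro j hj
    have hstep := toDigits_step 2 (2 ^ (n+1) + j) (by omega)
      (by have h2 : 2 ^ 1 ≤ 2 ^ (n+1) := Nat.pow_le_pow_right (by omega) (by omega)
          simp at h2; omega)
    have hdiv : (2 ^ (n+1) + j) / 2 = 2 ^ n + j / 2 := by
      have : 2 ^ (n+1) = 2 * 2 ^ n := by ring
      omega
    have hmod : (2 ^ (n+1) + j) % 2 = j % 2 := by
      have : 2 ^ (n+1) = 2 * 2 ^ n := by ring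
      omega
    rw [hstep, hdiv, hmod, ih (j / 2) (by omega), padC_div n j hn hj]
    simp

theorem padC_succ_high (n j : Nat) (hn : 1 ≤ n) (hj : j < 2 ^ n) :
    padC (n + 1) (2 ^ n + j) = '1' :: padC n j := by
  have hT := toDigits_two_pow_add n hn j hj
  have hlen : (padC n j).length = n := by
    have hL : (Nat.toDigits 2 j).length ≤ n := Nat.toDigits_length 2 j n hn hj
    unfold padC
    simp [List.length_append, List.length_replicate]
    omega
  show List.replicate ((n+1) - (Nat.toDigits 2 (2 ^ n + j)).length) '0'
      ++ Nat.toDigits 2 (2 ^ n + j) = _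
  rw [hT]
  simp only [List.length_cons, hlen]
  simp

theorem range_padC_eq_bitsB (n : Nat) (hn : 1 ≤ n) :
    (List.range (2 ^ n)).map (padC n) = bitsB n := by
  induction n, hn using Nat.le_induction with
  | base => decide
  | succ n hn ih =>
    have hsplit : List.range (2 ^ (n+1)) = List.range (2 ^ n)
        ++ (List.range (2 ^ n)).map (fun x => 2 ^ n + x) := by
      rw [show 2 ^ (n+1) = 2 ^ n + 2 ^ n by ring, List.range_add]
    rw [hsplit, List.map_append, List.map_map]
    show _ ++ _ = (bitsB n).map (fun r => '0' :: r) ++ (bitsB n).map (fun r => '1' :: r)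
    congr 1
    · rw [← ih, List.map_map]
      exact List.map_congr_left (fun j hj =>
        padC_succ_low n j hn (List.mem_range.mp hj))
    · rw [← ih, List.map_map]
      exact List.map_congr_left (fun j hj =>
        padC_succ_high n j hn (List.mem_range.mp hj))


theorem mem_bitsB (n : Nat) (cs : List Char) :
    cs ∈ bitsB n ↔ cs.length = n ∧ ∀ c ∈ cs, c = '0' ∨ c = '1' := by
  induction n generalizing cs with
  | zero =>
    simp [bitsB, List.length_eq_zero_iff]
    rintro rfl; simp
  | succ n ih =>
    simp only [bitsB, List.mem_append, List.mem_map]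
    constructor
    · rintro (⟨r, hr, rfl⟩ | ⟨r, hr, rfl⟩) <;>
        · obtain ⟨h1, h2⟩ := (ih r).mp hr
          refine ⟨by simp [h1], ?_⟩
          intro c hc
          rcases List.mem_cons.mp hc with rfl | hc
          · simp
          · exact h2 c hc
    · rintro ⟨h1, h2⟩
      cases cs with
      | nil => simp at h1
      | cons c cs =>
        have hcs : cs ∈ bitsB n := (ih cs).mpr
          ⟨by simpa using h1, fun c' hc' => h2 c' (List.mem_cons_of_mem _ hc')⟩
        rcases h2 c List.mem_cons_self with rfl | rfl
        · exact Or.inl ⟨cs, hcs, rfl⟩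
        · exact Or.inr ⟨cs, hcs, rfl⟩

theorem nodup_bitsB (n : Nat) : (bitsB n).Nodup := by
  induction n with
  | zero => simp [bitsB]
  | succ n ih =>
    simp only [bitsB]
    refine List.Nodup.append ?_ ?_ ?_
    · exact ih.map (fun a b h => by simpa using h)
    · exact ih.map (fun a b h => by simpa using h)
    · intro x hx hy
      simp only [List.mem_map] at hx hy
      obtain ⟨r, _, rfl⟩ := hx
      obtain ⟨r', _, h⟩ := hy
      simp at h

theorem pair_eq_of_nodup {l : List (String × Int)} (h : (l.map Prod.fst).Nodup)
    {p q : String × Int} (hp : p ∈ l) (hq : q ∈ l) (hk : p.1 = q.1) : p = q := by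
  induction l with
  | nil => simp at hp
  | cons a t ih =>
    simp only [List.map_cons, List.nodup_cons] at h
    rcases List.mem_cons.mp hp with rfl | hp' <;> rcases List.mem_cons.mp hq with rfl | hq'
    · rfl
    · exact absurd (hk ▸ List.mem_map_of_mem (f := Prod.fst) hq') h.1
    · exact absurd (hk ▸ List.mem_map_of_mem (f := Prod.fst) hp') (by simpa [← hk] using h.1)
    · exact ih h.2 hp' hq'

theorem foldl_insert_overwrite (l : List (String × Int)) :
    ∀ (d : PySem.Dict String Int), d.keys.Nodup → (l.map Prod.fst).Nodup →
    (∀ p ∈ l, d.contains p.1 = true → d.get? p.1 = some p.2) →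
    (l.foldl (fun e kv => e.insert kv.1 kv.2) d).items
      = d.items ++ l.filter (fun p => !d.contains p.1) := by
  induction l with
  | nil => intro d _ _ _; simp
  | cons p t ih =>
    intro d hd hl h
    simp only [List.foldl_cons]
    by_cases hc : d.contains p.1 = true
    · -- overwrite with the identical value: the dict is unchanged
      have hins : d.insert p.1 p.2 = d := by
        apply PySem.Dict.ext
        rw [PySem.Dict.items_insert_of_contains d p.2 hc]
        conv_rhs => rw [← List.map_id d.items]
        apply List.map_congr_left
        intro q hq
        by_cases hqk : q.1 = p.1
        · have hmem : (p.1, p.2) ∈ d.items :=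
            (PySem.Dict.get?_eq_some_iff_mem_items d p.1 p.2 hd).mp
              (h p List.mem_cons_self hc)
          have : q = (p.1, p.2) := pair_eq_of_nodup hd hq hmem hqk
          simp [this]
        · simp [hqk]
      rw [hins, ih d hd (by simp at hl; exact hl.2)
        (fun q hq hcq => h q (List.mem_cons_of_mem _ hq) hcq)]
      simp [hc]
    · -- fresh key: it is appended
      have hc' : d.contains p.1 = false := by simpa using hc
      have hitems := PySem.Dict.items_insert_of_not_contains d p.2 hc'
      have hne : ∀ q ∈ t, q.1 ≠ p.1 := by
        intro q hq
        simp only [List.map_cons, List.nodup_cons] at hl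
        exact fun hqp => hl.1 (hqp ▸ List.mem_map_of_mem (f := Prod.fst) hq)
      have hkeys : (d.insert p.1 p.2).keys.Nodup := by
        rw [PySem.Dict.keys, hitems]
        simp only [List.map_append]
        rw [← PySem.Dict.keys]
        refine List.Nodup.append hd (by simp) ?_
        intro x hx hy
        simp only [List.map_cons, List.map_nil, List.mem_cons, List.not_mem_nil, or_false] at hy
        subst hy
        rw [← PySem.Dict.contains_iff_mem_keys] at hx  -- may need adjusting
        simp [hx] at hc'
      rw [ih (d.insert p.1 p.2) hkeys (by simp at hl; exact hl.2) ?_ ]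
      · rw [hitems, List.append_assoc]
        congr 1
        rw [List.filter_cons]
        simp only [hc', Bool.not_false, if_true, List.singleton_append]
        congr 1
        apply List.filter_congr
        intro q hq
        rw [PySem.Dict.contains_insert]
        simp [hne q hq]
      · intro q hq hcq
        rw [PySem.Dict.get?_insert_of_ne d p.2 (hne q hq)]
        apply h q (List.mem_cons_of_mem _ hq)
        rw [PySem.Dict.contains_insert] at hcq
        simpa [hne q hq] using hcq

theorem fmt0nb_natCast (n j : Nat) : fmt0nb n ((j : Nat) : Int) = padC n j := by
  simp [fmt0nb, PySem.Int.toBinChars, padC, show ¬((j : Int) < 0) by omega]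

-- the list of formatted strings A enumerates, for first key of length n
def prOf (n : Nat) : List String :=
  (PySem.List.pyRange 0 ((2:Int)^n)).map (fun i => String.ofList (fmt0nb n i))

theorem prOf_eq_map_padC (n : Nat) :
    prOf n = (List.range (2 ^ n)).map (fun j => String.ofList (padC n j)) := by
  unfold prOf
  rw [show ((2:Int)^n) = (((2 ^ n : Nat) : Int)) by push_cast; ring,
    PySem.List.pyRange_zero_natCast, List.map_map]
  exact List.map_congr_left (fun j _ => by simp [fmt0nb_natCast])

theorem ofList_injective : Function.Injective String.ofList := by
  intro a b h
  have := congrArg String.toList h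
  simpa [String.toList_ofList] using this

theorem nodup_prOf (n : Nat) : (prOf n).Nodup := by
  rw [prOf_eq_map_padC]
  rcases Nat.eq_zero_or_pos n with rfl | hn
  · decide
  · rw [show (List.range (2 ^ n)).map (fun j => String.ofList (padC n j))
        = ((List.range (2 ^ n)).map (padC n)).map String.ofList by rw [List.map_map]; rfl,
      range_padC_eq_bitsB n hn]
    exact (nodup_bitsB n).map ofList_injective

theorem prOf_eq_bitsB (n : Nat) (hn : 1 ≤ n) :
    prOf n = (bitsB n).map String.ofList := by
  rw [prOf_eq_map_padC, show (List.range (2 ^ n)).map (fun j => String.ofList (padC n j))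
        = ((List.range (2 ^ n)).map (padC n)).map String.ofList by rw [List.map_map]; rfl,
    range_padC_eq_bitsB n hn]

-- B's key test, expressed against the bitstring characterisation
theorem predB_eq (n : Nat) (s : String) :
    (decide (s.toList.length ≠ n)
      || s.toList.any (fun c => !(c == '0') && !(c == '1')))
    = !decide (s.toList.length = n ∧ ∀ c ∈ s.toList, c = '0' ∨ c = '1') := by
  by_cases h1 : s.toList.length = n
  · by_cases h2 : ∀ c ∈ s.toList, c = '0' ∨ c = '1'
    · have hany : s.toList.any (fun c => !(c == '0') && !(c == '1')) = false := by
        simp only [List.any_eq_false]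
        intro c hc
        rcases h2 c hc with rfl | rfl <;> decide
      simp [h1, hany]
      exact h2
    · have hany : s.toList.any (fun c => !(c == '0') && !(c == '1')) = true := by
        simp only [List.any_eq_true]
        obtain ⟨c, hc, hcc⟩ : ∃ c ∈ s.toList, ¬(c = '0' ∨ c = '1') := by
          simpa [not_forall] using h2
        exact ⟨c, hc, by simp [not_or] at hcc; simp [hcc.1, hcc.2]⟩
      simp [h1, h2, hany]
  · have h1' : ¬ s.length = n := by simpa using h1
    simp [h1']

theorem mem_prOf_iff (n : Nat) (hn : 1 ≤ n) (s : String) :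
    s ∈ prOf n ↔ (s.toList.length = n ∧ ∀ c ∈ s.toList, c = '0' ∨ c = '1') := by
  rw [prOf_eq_bitsB n hn]
  constructor
  · rintro hm
    obtain ⟨b, hb, rfl⟩ := List.mem_map.mp hm
    simpa [String.toList_ofList] using (mem_bitsB n b).mp hb
  · intro h
    refine List.mem_map.mpr ⟨s.toList, (mem_bitsB n s.toList).mpr h, String.ofList_toList⟩

-- the dict A builds from the formatted strings
theorem base_items (counts : List (String × Int)) (n : Nat) :
    ((prOf n).foldl
      (fun e r => e.insert r (PySem.Dict.getD (PySem.Dict.mk counts) r 0))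
      PySem.Dict.empty).items
    = (prOf n).map (fun r => (r, PySem.Dict.getD (PySem.Dict.mk counts) r 0)) := by
  have h := PySem.Dict.items_foldl_insert_fresh (prOf n) (fun r => r)
    (fun r => PySem.Dict.getD (PySem.Dict.mk counts) r 0) PySem.Dict.empty
    (by intro a _; simp [PySem.Dict.contains_empty])
    (by simpa using nodup_prOf n)
  simpa using h

theorem base_keys (counts : List (String × Int)) (n : Nat) :
    ((prOf n).foldl
      (fun e r => e.insert r (PySem.Dict.getD (PySem.Dict.mk counts) r 0))
      PySem.Dict.empty).keys = prOf n := by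
  rw [PySem.Dict.keys, base_items, List.map_map]
  simp [Function.comp_def]

-- A's result, in closed form
theorem A_closed (kv0 : String × Int) (t : List (String × Int))
    (hnd : (((kv0 :: t)).map Prod.fst).Nodup) :
    extend_counts (kv0 :: t)
      = (prOf kv0.1.toList.length).map
          (fun r => (r, PySem.Dict.getD (PySem.Dict.mk (kv0 :: t)) r 0))
        ++ (kv0 :: t).filter
          (fun p => !decide (p.1 ∈ prOf kv0.1.toList.length)) := by
  have hget : PySem.List.pyGet? (PySem.Dict.keys (PySem.Dict.mk (kv0 :: t))) 0
      = some kv0.1 := by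
    simp [PySem.List.pyGet?, PySem.List.pyIdx?, PySem.Dict.keys]
  set n := kv0.1.toList.length with hn
  set d := PySem.Dict.mk (kv0 :: t) with hdd
  set base := (prOf n).foldl (fun e r => e.insert r (PySem.Dict.getD d r 0))
    PySem.Dict.empty with hbase
  have hdkeys : d.keys.Nodup := by simpa [PySem.Dict.keys, hdd] using hnd
  have hbk : base.keys = prOf n := base_keys (kv0 :: t) n
  have hbkn : base.keys.Nodup := by rw [hbk]; exact nodup_prOf n
  have hcont : ∀ s : String, base.contains s = decide (s ∈ prOf n) := by
    intro s
    rw [PySem.Dict.contains_eq_decide_mem_keys, hbk]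
  have hover := foldl_insert_overwrite (kv0 :: t) base hbkn hnd ?_
  · conv_lhs => rw [extend_counts]
    rw [hget]
    show (PySem.Dict.items ((PySem.Dict.items d).foldl
        (fun e kv => e.insert kv.1 kv.2) base)) = _
    have hitems : PySem.Dict.items d = kv0 :: t := rfl
    rw [hitems, hover, base_items]
    congr 1
    exact List.filter_congr (fun q _ => by rw [hcont])
  · intro p hp hc
    rw [hcont] at hc
    have hmem : (p.1, PySem.Dict.getD d p.1 0) ∈ base.items := by
      rw [hbase, base_items]
      exact List.mem_map.mpr ⟨p.1, by simpa using hc, rfl⟩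
    have hval : PySem.Dict.getD d p.1 0 = p.2 :=
      PySem.Dict.getD_of_mem_items d (show (p.1, p.2) ∈ d.items by rw [Prod.mk.eta]; exact hp)
        hdkeys 0
    rw [← hval]
    exact (PySem.Dict.get?_eq_some_iff_mem_items base p.1 _ hbkn).mpr hmem

-- B's result, in closed form
theorem B_closed (kv0 : String × Int) (t : List (String × Int))
    (hnd : (((kv0 :: t)).map Prod.fst).Nodup) :
    extend_counts_alt (kv0 :: t)
      = (bitsB kv0.1.toList.length).map
          (fun b => (String.ofList b,
            PySem.Dict.getD (PySem.Dict.mk (kv0 :: t)) (String.ofList b) 0))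
        ++ (kv0 :: t).filter
          (fun kv => decide (kv.1.toList.length ≠ kv0.1.toList.length)
            || kv.1.toList.any (fun c => !(c == '0') && !(c == '1'))) := by
  set n := kv0.1.toList.length with hn
  set d := PySem.Dict.mk (kv0 :: t) with hdd
  set pairs1 := (bitsB n).map
    (fun b => (String.ofList b, PySem.Dict.getD d (String.ofList b) 0)) with hp1
  set pairs2 := (kv0 :: t).filter
    (fun kv => decide (kv.1.toList.length ≠ n)
      || kv.1.toList.any (fun c => !(c == '0') && !(c == '1'))) with hp2
  have hk1 : pairs1.map Prod.fst = (bitsB n).map String.ofList := by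
    rw [hp1, List.map_map]; rfl
  have hnd1 : (pairs1.map Prod.fst).Nodup := by
    rw [hk1]; exact (nodup_bitsB n).map ofList_injective
  have hnd2 : (pairs2.map Prod.fst).Nodup := by
    exact List.Nodup.sublist ((List.filter_sublist).map Prod.fst) hnd
  have hdisj : (pairs1.map Prod.fst).Disjoint (pairs2.map Prod.fst) := by
    intro s hs1 hs2
    rw [hk1] at hs1
    obtain ⟨b, hb, rfl⟩ := List.mem_map.mp hs1
    obtain ⟨h1, h2⟩ := (mem_bitsB n b).mp hb
    obtain ⟨q, hq, hq1⟩ := List.mem_map.mp hs2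
    have hqt : q.1.toList = b := by rw [hq1, String.toList_ofList]
    have := (List.mem_filter.mp hq).2
    rw [predB_eq] at this
    simp only [Bool.not_eq_eq_eq_not, Bool.not_true, decide_eq_false_iff_not] at this
    exact this ⟨by rw [hqt]; exact h1, by rw [hqt]; exact h2⟩
  have hfresh := PySem.Dict.items_foldl_insert_fresh (pairs1 ++ pairs2) Prod.fst Prod.snd
    PySem.Dict.empty (by intro a _; simp [PySem.Dict.contains_empty])
    (by rw [List.map_append]; exact List.Nodup.append hnd1 hnd2 hdisj)
  show PySem.Dict.items (PySem.Dict.ofList (pairs1 ++ pairs2)) = pairs1 ++ pairs2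
  rw [PySem.Dict.ofList, PySem.Dict.update]
  rw [show (fun (acc : PySem.Dict String Int) (p : String × Int) => acc.insert p.1 p.2)
      = (fun d a => d.insert (Prod.fst a) (Prod.snd a)) from rfl, hfresh]
  simp [PySem.Dict.empty]

-- ===== VERDICT (by name: the statement is the Claim_ definition above) =====
theorem extend_counts_spec : Claim_unchanged_extend_counts := by
  intro counts _ hpre
  unfold Spec_extend_counts
  intro hD
  obtain ⟨hne, hnd, hpc⟩ := hpre
  obtain ⟨kv0, t, rfl⟩ : ∃ kv0 t, counts = kv0 :: t := by
    cases counts with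
    | nil => exact absurd rfl hne
    | cons a l => exact ⟨a, l, rfl⟩
  have hkey : kv0.1 ≠ "" := by
    intro h
    by_cases hz : "0" ∈ (kv0 :: t).map Prod.fst
    · exact hpc ⟨by simp [h], hz⟩
    · exact hD ⟨by simp [h], hz⟩
  have hn1 : 1 ≤ kv0.1.toList.length := by
    rcases Nat.eq_zero_or_pos kv0.1.toList.length with h0 | h
    · exfalso
      apply hkey
      have : kv0.1.toList = [] := List.length_eq_zero_iff.mp h0
      rw [← String.ofList_toList (s := kv0.1), this]
    · exact h
  rw [A_closed kv0 t hnd, B_closed kv0 t hnd]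
  congr 1
  · rw [prOf_eq_bitsB _ hn1, List.map_map]; rfl
  · apply List.filter_congr
    intro q _
    rw [predB_eq]
    congr 1
    rw [Bool.eq_iff_iff]
    simp only [decide_eq_true_eq]
    exact mem_prOf_iff _ hn1 q.1

theorem extend_counts_changed : Claim_changed_extend_counts := by
  unfold Claim_changed_extend_counts; decide

theorem extend_counts_tight : Claim_exact_extend_counts := by
  intro counts _ hpre hD
  obtain ⟨hne, hnd, hpc⟩ := hpre
  obtain ⟨kv0, t, rfl⟩ : ∃ kv0 t, counts = kv0 :: t := by
    cases counts with
    | nil => exact absurd rfl hne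
    | cons a l => exact ⟨a, l, rfl⟩
  have hkey : kv0.1 = "" := by
    simpa [D_extend_counts] using hD.1
  have hn0 : kv0.1.toList.length = 0 := by rw [hkey]; rfl
  intro hAB
  rw [A_closed kv0 t hnd, B_closed kv0 t hnd, hn0] at hAB
  have hpr : prOf 0 = ["0"] := by decide
  rw [hpr] at hAB
  simp only [bitsB, List.map_cons, List.map_nil, List.cons_append, List.nil_append] at hAB
  injection hAB with h01 _
  have hne' : ¬ (("0", PySem.Dict.getD (PySem.Dict.mk (kv0 :: t)) "0" 0)
      = (String.ofList [], PySem.Dict.getD (PySem.Dict.mk (kv0 :: t)) (String.ofList []) 0)) := by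
    intro h
    have h0 : ("0" : String) = String.ofList [] := congrArg Prod.fst h
    exact absurd h0 (by decide)
  exact hne' h01
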